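-- pv_equiv track=rewrite | github.com/Andrew17721/automata_practical_exam_-4448- | Turing machine.py | accepts_0n1n0n1n
-- ===== SOURCE A (Python) =====
-- def accepts_0n1n0n1n(s: str) -> bool:
--     count = [0, 0, 0, 0]
--     index = 0
--     i = 0
--
--     while i < len(s):
--         if index == 0 and s[i] == '0':
--             count[0] += 1
--         elif index <= 1 and s[i] == '1':
--             index = 1
--             count[1] += 1
--         elif index <= 2 and s[i] == '0':
--             index = 2
--             count[2] += 1
--         elif index <= 3 and s[i] == '1':
--             index = 3
--             count[3] += 1
--         else:
--             return False
--         i += 1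
--
--     return count[0] == count[1] == count[2] == count[3]
-- ===== SOURCE B (Python) =====
-- def accepts_0n1n0n1n(s: str) -> bool:
--     n, r = divmod(len(s), 4)
--     return r == 0 and s == '0' * n + '1' * n + '0' * n + '1' * n
-- ===== Notes on version B (the rewrite author's own statement) =====
-- stated objective: simpler
-- what changed: Replaces the per-character four-state counting machine with a closed-form construct-and-compare: build the unique accepted string of that length (len divisible by 4) and test equality.
import Mathlib
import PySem

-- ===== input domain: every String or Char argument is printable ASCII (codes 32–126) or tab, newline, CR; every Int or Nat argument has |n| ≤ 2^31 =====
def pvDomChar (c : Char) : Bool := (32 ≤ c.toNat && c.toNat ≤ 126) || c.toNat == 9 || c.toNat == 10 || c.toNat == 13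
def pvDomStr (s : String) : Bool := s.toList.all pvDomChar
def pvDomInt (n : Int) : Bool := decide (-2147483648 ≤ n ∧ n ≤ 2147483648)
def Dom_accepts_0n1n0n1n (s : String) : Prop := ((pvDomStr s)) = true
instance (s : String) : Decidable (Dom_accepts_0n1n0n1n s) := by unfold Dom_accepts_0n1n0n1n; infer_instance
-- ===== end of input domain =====

-- B replaces A's per-character four-state counting machine by a closed-form
-- construct-and-compare of the unique candidate string (objective: simpler).

-- ===== PORT A =====
-- A's while loop, step for step: state = (index, count[0..3]), branches in A's order;
-- the final line is Python's chained comparison count[0]==count[1]==count[2]==count[3]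
def goA : List Char → Nat → Nat → Nat → Nat → Nat → Bool
  | [], _, c0, c1, c2, c3 => c0 == c1 && (c1 == c2 && c2 == c3)
  | ch :: rest, index, c0, c1, c2, c3 =>
    if index == 0 && ch == '0' then goA rest index (c0 + 1) c1 c2 c3
    else if index ≤ 1 && ch == '1' then goA rest 1 c0 (c1 + 1) c2 c3
    else if index ≤ 2 && ch == '0' then goA rest 2 c0 c1 (c2 + 1) c3
    else if index ≤ 3 && ch == '1' then goA rest 3 c0 c1 c2 (c3 + 1)
    else false


def accepts_0n1n0n1n (s : String) : Bool := goA s.toList 0 0 0 0 0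

-- ===== PORT B =====
-- Source B: n, r = divmod(len(s), 4); return r == 0 and s == '0'*n + '1'*n + '0'*n + '1'*n
def accepts_0n1n0n1n_alt (s : String) : Bool :=
  let L := s.toList
  let n := L.length / 4
  L.length % 4 == 0 &&
    L == List.replicate n '0' ++ (List.replicate n '1' ++ (List.replicate n '0' ++ List.replicate n '1'))

-- ===== PRECONDITION & SPEC =====
def Spec_accepts_0n1n0n1n (s : String) (out : Bool) : Prop := out = accepts_0n1n0n1n_alt s
instance (s : String) (out : Bool) : Decidable (Spec_accepts_0n1n0n1n s out) := by unfold Spec_accepts_0n1n0n1n; infer_instance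

-- ===== CLAIM (what is proved, stated in full; the proofs are below) =====
def Claim_equal_accepts_0n1n0n1n : Prop := ∀ (s : String), Dom_accepts_0n1n0n1n s → Spec_accepts_0n1n0n1n s (accepts_0n1n0n1n s)

-- ===== LEMMAS AND PROOFS =====

theorem step3 (ch : Char) (rest : List Char) (c0 c1 c2 c3 : Nat) :
    goA (ch :: rest) 3 c0 c1 c2 c3 = (if ch = '1' then goA rest 3 c0 c1 c2 (c3+1) else false) := by
  simp [goA]

theorem step2 (ch : Char) (rest : List Char) (c0 c1 c2 c3 : Nat) :
    goA (ch :: rest) 2 c0 c1 c2 c3 =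
      (if ch = '0' then goA rest 2 c0 c1 (c2+1) c3
       else if ch = '1' then goA rest 3 c0 c1 c2 (c3+1) else false) := by
  simp [goA]

theorem step1 (ch : Char) (rest : List Char) (c0 c1 c2 c3 : Nat) :
    goA (ch :: rest) 1 c0 c1 c2 c3 =
      (if ch = '1' then goA rest 1 c0 (c1+1) c2 c3
       else if ch = '0' then goA rest 2 c0 c1 (c2+1) c3 else false) := by
  simp [goA]; split_ifs with h h' <;> simp_all

theorem step0 (ch : Char) (rest : List Char) (c0 c1 c2 c3 : Nat) :
    goA (ch :: rest) 0 c0 c1 c2 c3 =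
      (if ch = '0' then goA rest 0 (c0+1) c1 c2 c3
       else if ch = '1' then goA rest 1 c0 (c1+1) c2 c3 else false) := by
  simp [goA]; split_ifs with h h' <;> simp_all

theorem goA3 (L : List Char) : ∀ c0 c1 c2 c3, goA L 3 c0 c1 c2 c3 = true ↔
    ∃ d, L = List.replicate d '1' ∧ c0 = c1 ∧ c1 = c2 ∧ c2 = c3 + d := by
  induction L with
  | nil =>
    intro c0 c1 c2 c3
    constructor
    · intro h; simp [goA] at h; exact ⟨0, by simp, h.1, h.2.1, by omega⟩
    · rintro ⟨d, hd, h0, h1, h2⟩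
      have hd0 : d = 0 := by
        cases d with
        | zero => rfl
        | succ k => simp [List.replicate_succ] at hd
      subst hd0; simp [goA]; omega
  | cons ch rest ih =>
    intro c0 c1 c2 c3
    rw [step3]
    by_cases h : ch = '1'
    · subst h; rw [if_pos rfl, ih]
      constructor
      · rintro ⟨d, hd, h0, h1, h2⟩
        exact ⟨d + 1, by simp [List.replicate_succ, hd], h0, h1, by omega⟩
      · rintro ⟨d, hd, h0, h1, h2⟩
        cases d with
        | zero => simp at hd
        | succ k =>
          simp [List.replicate_succ] at hd
          exact ⟨k, hd, h0, h1, by omega⟩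
    · rw [if_neg h]
      simp only [Bool.false_eq_true, false_iff]
      rintro ⟨d, hd, _⟩
      cases d with
      | zero => simp at hd
      | succ k => simp [List.replicate_succ] at hd; exact h hd.1

theorem goA2 (L : List Char) : ∀ c0 c1 c2 c3, goA L 2 c0 c1 c2 c3 = true ↔
    ∃ c d, L = List.replicate c '0' ++ List.replicate d '1' ∧
      c0 = c1 ∧ c1 = c2 + c ∧ c2 + c = c3 + d := by
  induction L with
  | nil =>
    intro c0 c1 c2 c3
    constructor
    · intro h; simp [goA] at h; exact ⟨0, 0, by simp, h.1, by omega, by omega⟩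
    · rintro ⟨c, d, hd, h0, h1, h2⟩
      have hc : c = 0 := by
        cases c with
        | zero => rfl
        | succ k => simp [List.replicate_succ] at hd
      subst hc
      have hd0 : d = 0 := by
        cases d with
        | zero => rfl
        | succ k => simp [List.replicate_succ] at hd
      subst hd0; simp [goA]; omega
  | cons ch rest ih =>
    intro c0 c1 c2 c3
    rw [step2]
    by_cases h0 : ch = '0'
    · subst h0; rw [if_pos rfl, ih]
      constructor
      · rintro ⟨c, d, hd, ha, hb, hc⟩
        exact ⟨c + 1, d, by simp [List.replicate_succ, hd], ha, by omega, by omega⟩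
      · rintro ⟨c, d, hd, ha, hb, hc⟩
        cases c with
        | zero =>
          cases d with
          | zero => simp at hd
          | succ k => simp [List.replicate_succ] at hd
        | succ k =>
          simp [List.replicate_succ] at hd
          exact ⟨k, d, hd, ha, by omega, by omega⟩
    · rw [if_neg h0]
      by_cases h1 : ch = '1'
      · subst h1; rw [if_pos rfl, goA3]
        constructor
        · rintro ⟨d, hd, ha, hb, hc⟩
          exact ⟨0, d + 1, by simp [List.replicate_succ, hd], ha, by omega, by omega⟩
        · rintro ⟨c, d, hd, ha, hb, hc⟩
          have hc0 : c = 0 := by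
            cases c with
            | zero => rfl
            | succ k => simp [List.replicate_succ] at hd
          subst hc0
          simp at hd
          cases d with
          | zero => simp at hd
          | succ k =>
            simp [List.replicate_succ] at hd
            exact ⟨k, hd, ha, by omega, by omega⟩
      · rw [if_neg h1]
        simp only [Bool.false_eq_true, false_iff]
        rintro ⟨c, d, hd, _⟩
        cases c with
        | zero =>
          simp at hd
          cases d with
          | zero => simp at hd
          | succ k => simp [List.replicate_succ] at hd; exact h1 hd.1
        | succ k => simp [List.replicate_succ] at hd; exact h0 hd.1

theorem goA1 (L : List Char) : ∀ c0 c1 c2 c3, goA L 1 c0 c1 c2 c3 = true ↔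
    ∃ b c d, L = List.replicate b '1' ++ (List.replicate c '0' ++ List.replicate d '1') ∧
      (c = 0 → d = 0) ∧ c0 = c1 + b ∧ c1 + b = c2 + c ∧ c2 + c = c3 + d := by
  induction L with
  | nil =>
    intro c0 c1 c2 c3
    constructor
    · intro h; simp [goA] at h
      exact ⟨0, 0, 0, by simp, fun _ => rfl, by omega, by omega, by omega⟩
    · rintro ⟨b, c, d, hd, _, h0, h1, h2⟩
      have hl := congrArg List.length hd
      simp at hl
      simp [goA]; omega
  | cons ch rest ih =>
    intro c0 c1 c2 c3
    rw [step1]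
    by_cases h1 : ch = '1'
    · subst h1; rw [if_pos rfl, ih]
      constructor
      · rintro ⟨b, c, d, hd, hcan, ha, hb, hc⟩
        exact ⟨b + 1, c, d, by simp [List.replicate_succ, hd], hcan, by omega, by omega, hc⟩
      · rintro ⟨b, c, d, hd, hcan, ha, hb, hc⟩
        cases b with
        | zero =>
          exfalso
          cases c with
          | zero =>
            have hd0 : d = 0 := hcan rfl
            subst hd0; simp at hd
          | succ k => simp [List.replicate_succ] at hd
        | succ k =>
          simp [List.replicate_succ] at hd
          exact ⟨k, c, d, hd, hcan, by omega, by omega, hc⟩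
    · rw [if_neg h1]
      by_cases h0 : ch = '0'
      · subst h0; rw [if_pos rfl, goA2]
        constructor
        · rintro ⟨c, d, hd, ha, hb, hc⟩
          exact ⟨0, c + 1, d, by simp [List.replicate_succ, hd], by omega, by omega, by omega, by omega⟩
        · rintro ⟨b, c, d, hd, hcan, ha, hb, hc⟩
          have hb0 : b = 0 := by
            cases b with
            | zero => rfl
            | succ k => simp [List.replicate_succ] at hd
          subst hb0
          simp at hd
          cases c with
          | zero =>
            exfalso
            have hd0 : d = 0 := hcan rfl
            subst hd0; simp at hd
          | succ k =>
            simp [List.replicate_succ] at hd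
            exact ⟨k, d, hd, by omega, by omega, by omega⟩
      · rw [if_neg h0]
        simp only [Bool.false_eq_true, false_iff]
        rintro ⟨b, c, d, hd, hcan, _⟩
        cases b with
        | zero =>
          simp at hd
          cases c with
          | zero =>
            have hd0 : d = 0 := hcan rfl
            subst hd0; simp at hd
          | succ k => simp [List.replicate_succ] at hd; exact h0 hd.1
        | succ k => simp [List.replicate_succ] at hd; exact h1 hd.1

theorem goA0 (L : List Char) : ∀ c0 c1 c2 c3, goA L 0 c0 c1 c2 c3 = true ↔
    ∃ a b c d, L = List.replicate a '0' ++ (List.replicate b '1' ++ (List.replicate c '0' ++ List.replicate d '1')) ∧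
      (b = 0 → c = 0) ∧ (c = 0 → d = 0) ∧
      c0 + a = c1 + b ∧ c1 + b = c2 + c ∧ c2 + c = c3 + d := by
  induction L with
  | nil =>
    intro c0 c1 c2 c3
    constructor
    · intro h; simp [goA] at h
      exact ⟨0, 0, 0, 0, by simp, fun _ => rfl, fun _ => rfl, by omega, by omega, by omega⟩
    · rintro ⟨a, b, c, d, hd, _, _, h0, h1, h2⟩
      have hl := congrArg List.length hd
      simp at hl
      simp [goA]; omega
  | cons ch rest ih =>
    intro c0 c1 c2 c3
    rw [step0]
    by_cases h0 : ch = '0'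
    · subst h0; rw [if_pos rfl, ih]
      constructor
      · rintro ⟨a, b, c, d, hd, hc1, hc2, hx, hy, hz⟩
        exact ⟨a + 1, b, c, d, by simp [List.replicate_succ, hd], hc1, hc2, by omega, hy, hz⟩
      · rintro ⟨a, b, c, d, hd, hc1, hc2, hx, hy, hz⟩
        cases a with
        | zero =>
          exfalso
          cases b with
          | zero =>
            have hc0 : c = 0 := hc1 rfl
            have hd0 : d = 0 := hc2 hc0
            subst hc0; subst hd0; simp at hd
          | succ k => simp [List.replicate_succ] at hd
        | succ k =>
          simp [List.replicate_succ] at hd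
          exact ⟨k, b, c, d, hd, hc1, hc2, by omega, hy, hz⟩
    · rw [if_neg h0]
      by_cases h1 : ch = '1'
      · subst h1; rw [if_pos rfl, goA1]
        constructor
        · rintro ⟨b, c, d, hd, hcan, hx, hy, hz⟩
          exact ⟨0, b + 1, c, d, by simp [List.replicate_succ, hd], by omega, hcan, by omega, by omega, hz⟩
        · rintro ⟨a, b, c, d, hd, hc1, hc2, hx, hy, hz⟩
          have ha0 : a = 0 := by
            cases a with
            | zero => rfl
            | succ k => simp [List.replicate_succ] at hd
          subst ha0
          simp at hd
          cases b with
          | zero =>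
            exfalso
            have hc0 : c = 0 := hc1 rfl
            have hd0 : d = 0 := hc2 hc0
            subst hc0; subst hd0; simp at hd
          | succ k =>
            simp [List.replicate_succ] at hd
            exact ⟨k, c, d, hd, hc2, by omega, by omega, hz⟩
      · rw [if_neg h1]
        simp only [Bool.false_eq_true, false_iff]
        rintro ⟨a, b, c, d, hd, hc1, hc2, _⟩
        cases a with
        | zero =>
          simp at hd
          cases b with
          | zero =>
            have hc0 : c = 0 := hc1 rfl
            have hd0 : d = 0 := hc2 hc0
            subst hc0; subst hd0; simp at hd
          | succ k => simp [List.replicate_succ] at hd; exact h1 hd.1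
        | succ k => simp [List.replicate_succ] at hd; exact h0 hd.1


theorem acc_iff (L : List Char) : goA L 0 0 0 0 0 = true ↔
    ∃ n, L = List.replicate n '0' ++ (List.replicate n '1' ++ (List.replicate n '0' ++ List.replicate n '1')) := by
  rw [goA0]
  constructor
  · rintro ⟨a, b, c, d, hd, _, _, hx, hy, hz⟩
    refine ⟨a, ?_⟩
    rw [hd, show b = a from by omega, show c = a from by omega, show d = a from by omega]
  · rintro ⟨n, hn⟩
    exact ⟨n, n, n, n, hn, by omega, by omega, by omega, by omega, by omega⟩

theorem alt_iff (s : String) : accepts_0n1n0n1n_alt s = true ↔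
    ∃ n, s.toList = List.replicate n '0' ++ (List.replicate n '1' ++ (List.replicate n '0' ++ List.replicate n '1')) := by
  simp only [accepts_0n1n0n1n_alt, Bool.and_eq_true, beq_iff_eq]
  constructor
  · rintro ⟨h4, heq⟩; exact ⟨_, heq⟩
  · rintro ⟨n, hn⟩
    have hl : s.toList.length = 4 * n := by rw [hn]; simp; omega
    have hq : s.toList.length / 4 = n := by omega
    refine ⟨by omega, ?_⟩
    rw [hq]; exact hn


-- ===== VERDICT (by name: the statement is the Claim_ definition above) =====
theorem accepts_0n1n0n1n_spec : Claim_equal_accepts_0n1n0n1n := by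
  intro s _
  show accepts_0n1n0n1n s = accepts_0n1n0n1n_alt s
  exact Bool.eq_iff_iff.mpr ((acc_iff s.toList).trans (alt_iff s).symm)
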